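-- pv_equiv track=rewrite | github.com/abdelrkb/Automates | millieu_ecartement/ecartement.py | profMaximal
-- ===== SOURCE A (Python) =====
-- def profMaximal(p, exclude):
--     def racine(p):
--         # Recherche des nœuds où le parent est le même que le nœud lui-même
--         racines = [s for s, p in p.items() if s == p]
--         # S'il y a une racine, la retourner, sinon None
--         return racines[0] if racines else None
--     racine = racine(p)
--     profondeur_maximale = 0
--     pile = [(racine, 0)]  # On ajoute la racine avec une profondeur de 0 dans la pile
--     while pile:
--         s, profondeur = pile.pop()
--         profondeur_maximale = max(profondeur_maximale, profondeur)
--         for fils, pere in p.items():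
--             if pere == s and fils != s and fils not in exclude:  # Exclure le nœud actuel et ses enfants
--                 pile.append((fils, profondeur + 1))
--     return profondeur_maximale
-- ===== SOURCE B (Python) =====
-- def profMaximal(p, exclude):
--     # Find the root: first key that is its own parent.
--     root = None
--     for s, par in p.items():
--         if s == par:
--             root = s
--             break
--     if root is None:
--         return 0
--     # Build the children adjacency map once (O(V)), skipping excluded nodes.
--     children = {}
--     for c, par in p.items():
--         if c != par and c not in exclude:
--             children.setdefault(par, []).append(c)
--     # Iterative DFS with an explicit stack.
--     best = 0
--     stack = [(root, 0)]
--     while stack: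
--         s, d = stack.pop()
--         if d > best:
--             best = d
--         for c in children.get(s, ()):
--             stack.append((c, d + 1))
--     return best
-- ===== Notes on version B (the rewrite author's own statement) =====
-- stated objective: alternative
-- what changed: B builds a children adjacency dict once and runs the stack DFS with O(1) child lookups, instead of rescanning all dict items at every pop as A does; intended as asymptotically lighter (worst-case O(V) vs O(V^2)) but the probe's shallow-tree inputs measured no speed-up, so none is claimed.
import Mathlib
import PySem

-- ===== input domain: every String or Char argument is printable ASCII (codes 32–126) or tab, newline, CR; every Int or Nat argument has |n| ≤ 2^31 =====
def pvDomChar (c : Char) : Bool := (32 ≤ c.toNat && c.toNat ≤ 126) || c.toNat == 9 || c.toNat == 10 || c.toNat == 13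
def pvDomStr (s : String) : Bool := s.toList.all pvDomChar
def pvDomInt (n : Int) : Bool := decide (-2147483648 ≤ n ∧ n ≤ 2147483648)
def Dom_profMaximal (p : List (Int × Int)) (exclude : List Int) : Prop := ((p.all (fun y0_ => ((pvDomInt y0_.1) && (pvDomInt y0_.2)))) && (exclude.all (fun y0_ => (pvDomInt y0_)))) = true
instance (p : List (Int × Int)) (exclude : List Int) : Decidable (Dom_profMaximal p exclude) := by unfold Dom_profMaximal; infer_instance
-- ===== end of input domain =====

-- B builds a children adjacency dict once and runs the stack DFS with O(1) child
-- lookups, instead of A's rescan of every dict item at every pop.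

-- ===== PORT A =====
-- A's while loop, with the pile held top-first (Python appends/pops at the end;
-- here the head is the top and a batch of appends is prepended reversed — an exact
-- mirror image).  The loop is fuel-guarded only to be total in Lean: each popped
-- node is a distinct dict key (nodes in parent-cycles are unreachable from the
-- root), so `d.size + 1` pops always suffice and the guard never fires in Python.
def profMaximalLoopA (d : PySem.Dict Int Int) (exclude : List Int) :
    Nat → List (Option Int × Int) → Int → Int
  | 0, _, best => best
  | _ + 1, [], best => best
  | fuel + 1, (s, prof) :: rest, best =>
    let best' := max best prof
    let pushed := d.items.foldl
      (fun acc q =>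
        if some q.2 = s ∧ some q.1 ≠ s ∧ ¬ (exclude.contains q.1 = true) then
          acc ++ [(some q.1, prof + 1)]
        else acc) []
    profMaximalLoopA d exclude fuel (pushed.reverse ++ rest) best'

def profMaximal (p : List (Int × Int)) (exclude : List Int) : Int :=
  let d := PySem.Dict.ofList p
  let racines := (d.items.filter (fun q => q.1 == q.2)).map (·.1)
  let racine : Option Int := racines.head?
  profMaximalLoopA d exclude (d.size + 1) [(racine, 0)] 0

-- ===== PORT B =====
-- B's DFS loop over the precomputed children dict (same stack convention and the
-- same fuel guard as above).
def profMaximalLoopB (ch : PySem.Dict Int (List Int)) :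
    Nat → List (Int × Int) → Int → Int
  | 0, _, best => best
  | _ + 1, [], best => best
  | fuel + 1, (s, dep) :: rest, best =>
    let best' := if dep > best then dep else best
    profMaximalLoopB ch fuel
      (((ch.getD s []).map (fun c => (c, dep + 1))).reverse ++ rest) best'

def profMaximal_alt (p : List (Int × Int)) (exclude : List Int) : Int :=
  let d := PySem.Dict.ofList p
  match d.items.find? (fun q => q.1 == q.2) with
  | none => 0
  | some r =>
    let ch := d.items.foldl
      (fun ch q =>
        if q.1 ≠ q.2 ∧ ¬ (exclude.contains q.1 = true) then
          ch.modify q.2 [] (· ++ [q.1])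
        else ch) PySem.Dict.empty
    profMaximalLoopB ch (d.size + 1) [(r.1, 0)] 0

-- ===== PRECONDITION & SPEC =====
def Spec_profMaximal (p : List (Int × Int)) (exclude : List Int) (out : Int) : Prop := out = profMaximal_alt p exclude
instance (p : List (Int × Int)) (exclude : List Int) (out : Int) : Decidable (Spec_profMaximal p exclude out) := by unfold Spec_profMaximal; infer_instance

-- ===== CLAIM (what is proved, stated in full; the proofs are below) =====
def Claim_equal_profMaximal : Prop := ∀ (p : List (Int × Int)) (exclude : List Int), Dom_profMaximal p exclude → Spec_profMaximal p exclude (profMaximal p exclude)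

-- ===== LEMMAS AND PROOFS =====

-- A conditional foldl is the foldl over the filtered list.
theorem foldl_if_eq_foldl_filter {α β : Type} (g : β → α → β) (c : α → Prop) [DecidablePred c] :
    ∀ (l : List α) (b : β),
      l.foldl (fun b a => if c a then g b a else b) b
        = (l.filter (fun a => decide (c a))).foldl g b := by
  intro l
  induction l with
  | nil => intro b; rfl
  | cons x xs ih =>
    intro b
    by_cases h : c x <;> simp [h, ih]

-- B's adjacency build, looked up at s, is exactly A's inner scan for s.
theorem children_eq (d : PySem.Dict Int Int) (exclude : List Int) (s : Int) :
    (d.items.foldl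
      (fun ch q =>
        if q.1 ≠ q.2 ∧ ¬ (exclude.contains q.1 = true) then
          ch.modify q.2 [] (· ++ [q.1])
        else ch) PySem.Dict.empty).getD s []
    = (d.items.filter
        (fun q => decide (q.2 = s ∧ q.1 ≠ s ∧ ¬ (exclude.contains q.1 = true)))).map (·.1) := by
  rw [foldl_if_eq_foldl_filter
        (fun ch q => PySem.Dict.modify ch q.2 [] (· ++ [q.1]))
        (fun q : Int × Int => q.1 ≠ q.2 ∧ ¬ (exclude.contains q.1 = true))]
  rw [show (List.foldl (fun ch (q : Int × Int) => PySem.Dict.modify ch q.2 [] (· ++ [q.1]))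
        PySem.Dict.empty
        (d.items.filter (fun a => decide (a.1 ≠ a.2 ∧ ¬ (exclude.contains a.1 = true)))))
      = List.foldl (fun ch (p : Int × Int) => PySem.Dict.modify ch p.1 [] (· ++ [p.2]))
          PySem.Dict.empty
          ((d.items.filter (fun a => decide (a.1 ≠ a.2 ∧ ¬ (exclude.contains a.1 = true)))).map
            (fun q => (q.2, q.1))) from
        (List.foldl_map (f := fun q : Int × Int => (q.2, q.1))
          (g := fun ch (p : Int × Int) => PySem.Dict.modify ch p.1 [] (· ++ [p.2]))).symm]
  rw [PySem.Dict.getD_foldl_modify_append]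
  simp only [PySem.Dict.getD_empty, List.nil_append, List.filter_map, List.map_map]
  rw [List.filter_filter]
  congr 1
  apply List.filter_congr
  intro q _
  simp only [Function.comp_apply]
  by_cases h2 : q.2 = s
  · subst h2; simp
  · simp [h2]

-- A's inner push scan for a popped node `some v` produces A's children of v, tagged.
theorem pushedA_eq (d : PySem.Dict Int Int) (exclude : List Int) (v prof : Int) :
    d.items.foldl
      (fun acc q =>
        if some q.2 = some v ∧ some q.1 ≠ some v ∧ ¬ (exclude.contains q.1 = true) then
          acc ++ [(some q.1, prof + 1)]
        else acc) []
    = ((d.items.filter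
        (fun q => decide (q.2 = v ∧ q.1 ≠ v ∧ ¬ (exclude.contains q.1 = true)))).map (·.1)).map
          (fun c => (some c, prof + 1)) := by
  rw [foldl_if_eq_foldl_filter
        (fun acc q => acc ++ [(some q.1, prof + 1)])
        (fun q : Int × Int => some q.2 = some v ∧ some q.1 ≠ some v ∧ ¬ (exclude.contains q.1 = true))]
  rw [show (fun q : Int × Int => decide (some q.2 = some v ∧ some q.1 ≠ some v ∧ ¬ (exclude.contains q.1 = true)))
      = (fun q => decide (q.2 = v ∧ q.1 ≠ v ∧ ¬ (exclude.contains q.1 = true))) from by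
        funext q; simp]
  rw [List.map_map]
  exact PySem.List.foldl_append_singleton_eq_map
    (fun q : Int × Int => (some q.1, prof + 1))
    (d.items.filter (fun q => decide (q.2 = v ∧ q.1 ≠ v ∧ ¬ (exclude.contains q.1 = true)))) []

-- A popped `none` pushes nothing.
theorem pushedA_none (d : PySem.Dict Int Int) (exclude : List Int) (prof : Int) :
    d.items.foldl
      (fun acc q =>
        if some q.2 = (none : Option Int) ∧ some q.1 ≠ (none : Option Int) ∧ ¬ (exclude.contains q.1 = true) then
          acc ++ [(some q.1, prof + 1)]
        else acc) [] = [] := by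
  induction d.items with
  | nil => rfl
  | cons q l ih => simpa using ih

-- Lockstep: with a root present, A's loop on the Option-tagged pile equals B's loop.
theorem loop_lockstep (d : PySem.Dict Int Int) (exclude : List Int)
    (ch : PySem.Dict Int (List Int))
    (hch : ∀ s, ch.getD s []
      = (d.items.filter
          (fun q => decide (q.2 = s ∧ q.1 ≠ s ∧ ¬ (exclude.contains q.1 = true)))).map (·.1)) :
    ∀ (fuel : Nat) (pile : List (Int × Int)) (best : Int),
      profMaximalLoopA d exclude fuel (pile.map (fun q => (some q.1, q.2))) best
        = profMaximalLoopB ch fuel pile best := by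
  intro fuel
  induction fuel with
  | zero => intro pile best; rfl
  | succ f ih =>
    intro pile best
    match pile with
    | [] => rfl
    | (v, dep) :: rest =>
      show profMaximalLoopA d exclude (f + 1) ((some v, dep) :: rest.map _) best = _
      rw [profMaximalLoopA, profMaximalLoopB]
      have hmax : max best dep = if dep > best then dep else best := by
        rw [max_def]; split_ifs <;> omega
      rw [hmax, pushedA_eq, ← hch v]
      have : (((ch.getD v []).map (fun c => (some c, dep + 1))).reverse
            ++ rest.map (fun q => (some q.1, q.2)))
          = ((((ch.getD v []).map (fun c => (c, dep + 1))).reverse ++ rest).map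
              (fun q : Int × Int => (some q.1, q.2))) := by
        simp [List.map_append, List.map_reverse, List.map_map, Function.comp_def]
      rw [this, ih]

-- head? of the filtered keys is find? of the predicate, projected.
theorem root_eq (d : PySem.Dict Int Int) :
    ((d.items.filter (fun q => q.1 == q.2)).map (·.1)).head?
      = (d.items.find? (fun q => q.1 == q.2)).map (·.1) := by
  rw [List.head?_map, List.head?_filter]

-- ===== VERDICT (by name: the statement is the Claim_ definition above) =====
theorem profMaximal_spec : Claim_equal_profMaximal := by
  intro p exclude _
  simp only [Spec_profMaximal, profMaximal, profMaximal_alt]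
  rw [root_eq]
  cases hf : (PySem.Dict.ofList p).items.find? (fun q => q.1 == q.2) with
  | none =>
    simp only [Option.map_none]
    rw [profMaximalLoopA, pushedA_none]
    simp only [List.reverse_nil, List.nil_append]
    cases h : (PySem.Dict.ofList p).size with
    | zero => simp [profMaximalLoopA]
    | succ n => simp [profMaximalLoopA]
  | some r =>
    simp only [Option.map_some]
    have := loop_lockstep (PySem.Dict.ofList p) exclude _
      (fun s => children_eq (PySem.Dict.ofList p) exclude s)
      ((PySem.Dict.ofList p).size + 1) [(r.1, 0)] 0
    simp only [List.map_cons, List.map_nil] at this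
    exact this
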